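-- pv_equiv track=rewrite | github.com/errorreplicator/TensorFlow | tmp.py | ile
-- ===== SOURCE A (Python) =====
-- def ile(miesiac,dzien):
--     suma_dni = 0
--     if miesiac == 1:
--         return dzien-1
--     else:
--         for x in range(1,miesiac+1):
--             if x<miesiac:
--                 if x%2==0:
--                     suma_dni+=15
--                 else:
--                     suma_dni+=12
--             else:
--                 suma_dni+=(dzien-1)
--         return (suma_dni)
-- ===== SOURCE B (Python) =====
-- def ile(miesiac, dzien):
--     # closed form: among months 1..miesiac-1 there are (miesiac-1)//2 even
--     # months (15 days each) and miesiac//2 odd months (12 days each)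
--     return 15 * ((miesiac - 1) // 2) + 12 * (miesiac // 2) + dzien - 1
-- ===== Notes on version B (the rewrite author's own statement) =====
-- stated objective: faster
-- what changed: replaced the month-by-month loop with a closed-form count of even/odd months times 15/12 plus dzien-1
-- outside the precondition, e.g. on ile(0, 5): A returns 0, B returns -11; on ile(-3, 1): A returns 0, B returns -54
import Mathlib
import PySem

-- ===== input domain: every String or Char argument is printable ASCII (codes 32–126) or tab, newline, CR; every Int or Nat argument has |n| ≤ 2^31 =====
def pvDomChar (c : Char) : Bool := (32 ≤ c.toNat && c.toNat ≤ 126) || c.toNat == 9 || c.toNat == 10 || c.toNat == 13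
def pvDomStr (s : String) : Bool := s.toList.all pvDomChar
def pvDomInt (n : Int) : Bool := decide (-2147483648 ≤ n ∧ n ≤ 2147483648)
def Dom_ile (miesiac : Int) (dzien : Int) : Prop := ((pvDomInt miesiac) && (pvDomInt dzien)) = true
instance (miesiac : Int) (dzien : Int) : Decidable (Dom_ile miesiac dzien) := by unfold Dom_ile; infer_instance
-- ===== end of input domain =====

-- B replaces A's month-by-month loop with closed-form arithmetic (objective: faster).

-- ===== PORT A =====
def ile (miesiac : Int) (dzien : Int) : Int :=
  let suma_dni : Int := 0
  if miesiac == 1 then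
    dzien - 1
  else
    (PySem.List.pyRange 1 (miesiac + 1) 1).foldl
      (fun suma_dni x =>
        if x < miesiac then
          if PySem.Int.mod x 2 == 0 then suma_dni + 15 else suma_dni + 12
        else
          suma_dni + (dzien - 1))
      suma_dni

-- ===== PORT B =====
def ile_alt (miesiac : Int) (dzien : Int) : Int :=
  15 * PySem.Int.floordiv (miesiac - 1) 2 + 12 * PySem.Int.floordiv miesiac 2 + dzien - 1

-- ===== PRECONDITION & SPEC =====
-- Pre_ excludes non-positive miesiac, an out-of-calendar input on which A's loop never
-- runs and it returns 0 ignoring dzien, while B's closed form extrapolates the formula;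
-- neither value is specified for a nonexistent month, so both are equally defensible.
def Pre_ile (miesiac : Int) (dzien : Int) : Prop := 1 ≤ miesiac
instance (miesiac : Int) (dzien : Int) : Decidable (Pre_ile miesiac dzien) := by unfold Pre_ile; infer_instance
def pvWitness_ile : Int × Int := (7, 20)

def Spec_ile (miesiac : Int) (dzien : Int) (out : Int) : Prop := out = ile_alt miesiac dzien
instance (miesiac : Int) (dzien : Int) (out : Int) : Decidable (Spec_ile miesiac dzien out) := by unfold Spec_ile; infer_instance

-- ===== CLAIM (what is proved, stated in full; the proofs are below) =====
def Claim_equal_ile : Prop := ∀ (miesiac : Int) (dzien : Int), Dom_ile miesiac dzien → Pre_ile miesiac dzien → Spec_ile miesiac dzien (ile miesiac dzien)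

-- ===== LEMMAS AND PROOFS =====

-- the even/odd loop over months 1..n adds 15 per even month and 12 per odd month
theorem ile_loop_closed (n : Nat) (s0 : Int) :
    (PySem.List.pyRange 1 ((n : Int) + 1) 1).foldl
      (fun s x => if PySem.Int.mod x 2 = 0 then s + 15 else s + 12) s0
    = s0 + 15 * ((n / 2 : Nat) : Int) + 12 * (((n + 1) / 2 : Nat) : Int) := by
  induction n with
  | zero =>
      rw [show ((0 : Nat) : Int) + 1 = 1 by norm_num,
          PySem.List.pyRange_one_eq_nil (by norm_num)]
      simp
  | succ k ih =>
      have h1 : (1 : Int) ≤ (k : Int) + 1 := by omega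
      rw [show ((k + 1 : Nat) : Int) + 1 = ((k : Int) + 1) + 1 by push_cast; ring,
          PySem.List.pyRange_one_succ_right h1, List.foldl_append, ih]
      simp only [List.foldl]
      rw [PySem.Int.mod_eq_emod_of_pos (by norm_num : (0 : Int) < 2)]
      have hk2 : (k : Int) % 2 = 0 ∨ (k : Int) % 2 = 1 := by omega
      rcases hk2 with h | h <;>
        · split_ifs with hif <;> push_cast <;> omega

-- ===== VERDICT (by name: the statement is the Claim_ definition above) =====
theorem ile_spec : Claim_equal_ile := by
  intro m d _ hpre
  unfold Spec_ile ile ile_alt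
  by_cases h1 : m = 1
  · subst h1
    simp only [beq_self_eq_true, if_true]
    rw [
        show PySem.Int.floordiv (1 - 1) 2 = 0 by decide,
        show PySem.Int.floordiv 1 2 = 0 by decide]
    ring
  · have h2 : (2 : Int) ≤ m := by
      unfold Pre_ile at hpre; omega
    obtain ⟨n, hn⟩ : ∃ n : Nat, m = (n : Int) + 1 := ⟨(m - 1).toNat, by omega⟩
    subst hn
    simp only [beq_iff_eq, h1, if_false]
    rw [PySem.List.pyRange_one_succ_right (by omega : (1 : Int) ≤ (n : Int) + 1),
        List.foldl_append]
    have hc : (PySem.List.pyRange 1 ((n : Int) + 1) 1).foldl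
        (fun suma_dni x =>
          if x < (n : Int) + 1 then
            if PySem.Int.mod x 2 = 0 then suma_dni + 15 else suma_dni + 12
          else suma_dni + (d - 1)) 0
        = (PySem.List.pyRange 1 ((n : Int) + 1) 1).foldl
        (fun s x => if PySem.Int.mod x 2 = 0 then s + 15 else s + 12) 0 := by
      refine PySem.List.foldl_congr_mem _ _ _ _ ?_
      intro acc x hx
      have hlt := (PySem.List.mem_pyRange_one.mp hx).2
      rw [if_pos hlt]
    rw [hc, ile_loop_closed]
    simp only [List.foldl_cons, List.foldl_nil, lt_irrefl, if_false]
    have e1 : PySem.Int.floordiv ((n : Int) + 1 - 1) 2 = ((n / 2 : Nat) : Int) := by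
      rw [show (n : Int) + 1 - 1 = (n : Int) by ring]
      exact_mod_cast PySem.Int.floordiv_natCast n 2
    have e2 : PySem.Int.floordiv ((n : Int) + 1) 2 = (((n + 1) / 2 : Nat) : Int) := by
      rw [show (n : Int) + 1 = ((n + 1 : Nat) : Int) by push_cast; ring]
      exact_mod_cast PySem.Int.floordiv_natCast (n + 1) 2
    rw [e1, e2]
    ring
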